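-- pv_equiv track=rewrite | github.com/JasonTheWanger/similarItemSearch | eval_utils.py | build_true_sets
-- ===== SOURCE A (Python) =====
-- def build_true_sets(label_groups):
--     # ensure plain ints (not tensors) for hashing/grouping
--     label_groups = [int(g) for g in label_groups]
--     idx_by_group = {}
--     for i, g in enumerate(label_groups):
--         idx_by_group.setdefault(g, []).append(i)
--     true_sets = []
--     for i, g in enumerate(label_groups):
--         s = set(idx_by_group[g])
--         s.discard(i)
--         true_sets.append(s)
--     return true_sets
-- ===== SOURCE B (Python) =====
-- def build_true_sets(label_groups):
--     labels = [int(g) for g in label_groups]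
--     n = len(labels)
--     return [{j for j in range(n) if labels[j] == g and j != i}
--             for i, g in enumerate(labels)]
-- ===== Notes on version B (the rewrite author's own statement) =====
-- stated objective: simpler
-- what changed: Replaces the two-pass dict grouping (setdefault/append then per-index set construction) by a single direct comprehension that filters all indices with the same label per position.
import Mathlib
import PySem

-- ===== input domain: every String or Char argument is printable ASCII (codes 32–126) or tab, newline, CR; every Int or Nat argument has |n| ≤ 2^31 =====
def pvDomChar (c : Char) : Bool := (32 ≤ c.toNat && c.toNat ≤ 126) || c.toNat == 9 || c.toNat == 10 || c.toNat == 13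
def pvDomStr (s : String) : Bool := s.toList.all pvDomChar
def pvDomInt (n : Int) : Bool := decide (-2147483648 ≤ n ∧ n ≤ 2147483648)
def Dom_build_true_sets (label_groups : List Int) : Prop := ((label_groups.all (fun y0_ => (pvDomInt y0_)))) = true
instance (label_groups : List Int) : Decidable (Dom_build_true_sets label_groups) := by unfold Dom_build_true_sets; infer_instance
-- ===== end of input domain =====

-- B replaces A's dict grouping by a direct per-index comprehension: simpler, no dict pass.

-- ===== PORT A =====
def build_true_sets (label_groups : List Int) : List (List Int) :=
  -- 'int(g)' is the identity on Python ints
  let labels := label_groups.map (fun g => g)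
  -- 'idx_by_group.setdefault(g, []).append(i)' = modify g with default [] by appending i
  let idx_by_group : PySem.Dict Int (List Int) :=
    (PySem.List.enumerate labels).foldl
      (fun d p => d.modify p.2 [] (fun l => l ++ [p.1])) PySem.Dict.empty
  (PySem.List.enumerate labels).foldl
    (fun acc p =>
      acc ++ [PySem.Set.discard (PySem.Set.ofList (idx_by_group.getD p.2 [])) p.1]) []

-- ===== PORT B =====
def build_true_sets_alt (label_groups : List Int) : List (List Int) :=
  let labels := label_groups.map (fun g => g)
  let n : Int := PySem.List.len label_groups
  (PySem.List.enumerate labels).map (fun p =>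
    PySem.Set.ofList ((PySem.List.pyRange 0 n).filter
      (fun j => (PySem.List.pyGetD label_groups j 0 == p.2) && !(j == p.1))))

-- ===== PRECONDITION & SPEC =====
def Spec_build_true_sets (label_groups : List Int) (out : List (List Int)) : Prop := out = build_true_sets_alt label_groups
instance (label_groups : List Int) (out : List (List Int)) : Decidable (Spec_build_true_sets label_groups out) := by unfold Spec_build_true_sets; infer_instance

-- ===== CLAIM (what is proved, stated in full; the proofs are below) =====
def Claim_equal_build_true_sets : Prop := ∀ (label_groups : List Int), Dom_build_true_sets label_groups → Spec_build_true_sets label_groups (build_true_sets label_groups)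

-- ===== LEMMAS AND PROOFS =====

-- the grouping dict: the list stored at key g collects, in order, the first components
-- of the enumerated pairs whose second component is g
theorem group_foldl (l : List (Int × Int)) (d : PySem.Dict Int (List Int)) (g : Int) :
    (l.foldl (fun d p => d.modify p.2 [] (fun l => l ++ [p.1])) d).getD g []
      = d.getD g [] ++ (l.filter (fun p => p.2 == g)).map (·.1) := by
  induction l generalizing d with
  | nil => simp
  | cons p t ih =>
    simp only [List.foldl_cons, List.filter_cons]
    rw [ih]
    by_cases h : p.2 = g
    · subst h
      simp [PySem.Dict.modify, PySem.Dict.getD_insert_self]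
    · have hb : (p.2 == g) = false := by simp [h]
      simp [hb, PySem.Dict.modify, PySem.Dict.getD_insert_of_ne _ _ _ (Ne.symm h)]

-- ===== VERDICT (by name: the statement is the Claim_ definition above) =====

theorem build_true_sets_spec : Claim_equal_build_true_sets := by
  intro label_groups _
  show build_true_sets label_groups = build_true_sets_alt label_groups
  unfold build_true_sets build_true_sets_alt
  simp only [List.map_id_fun', id_eq]
  rw [PySem.List.foldl_append_singleton_eq_map, List.nil_append]
  rw [PySem.List.enumerate_eq_map_pyRange label_groups 0, List.map_map, List.map_map]
  apply List.map_congr_left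
  intro j _
  simp only [Function.comp]
  rw [group_foldl]
  -- dict.empty contributes nothing
  have hemp : (PySem.Dict.empty : PySem.Dict Int (List Int)).getD (PySem.List.pyGetD label_groups j 0) [] = [] := rfl
  rw [hemp, List.nil_append]
  -- the stored group list is a filter of the index range
  rw [List.filter_map, List.map_map]
  have hfst : ((fun p : Int × Int => p.1) ∘ fun j => (j, PySem.List.pyGetD label_groups j 0)) = id := rfl
  rw [hfst, List.map_id]
  have hnd : ((PySem.List.pyRange 0 (PySem.List.len label_groups)).filter
      ((fun p : Int × Int => p.2 == PySem.List.pyGetD label_groups j 0) ∘ fun j' => (j', PySem.List.pyGetD label_groups j' 0))).Nodup :=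
    (PySem.List.nodup_pyRange_one 0 (PySem.List.len label_groups)).filter _
  rw [PySem.Set.ofList_eq_self_of_nodup _ hnd]
  have hnd2 : ((PySem.List.pyRange 0 (PySem.List.len label_groups)).filter
      (fun j' => (PySem.List.pyGetD label_groups j' 0 == PySem.List.pyGetD label_groups j 0) && !(j' == j))).Nodup :=
    (PySem.List.nodup_pyRange_one 0 (PySem.List.len label_groups)).filter _
  rw [PySem.Set.ofList_eq_self_of_nodup _ hnd2]
  unfold PySem.Set.discard
  rw [List.filter_filter]
  apply List.filter_congr
  intro j' _
  simp [Bool.and_comm]
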